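-- pv_equiv track=rewrite | github.com/prmpsmart/GaM | src/backend/dc/dc_sorts.py | getDataByColumns
-- ===== SOURCE A (Python) =====
-- def getDataByColumns(datas, columns, datacols):
--     columnsNum = []
--     if datas and columns: columnsNum = [datacols.index(c) for c in columns]
--
--     refinedDatas = []
--
--     if columnsNum:
--         for data in datas:
--             _data = [data[cn] for cn in columnsNum]
--             refinedDatas.append(_data)
--
--     return refinedDatas or datas
-- ===== SOURCE B (Python) =====
-- def getDataByColumns(datas, columns, datacols):
--     if not (datas and columns):
--         return datas
--     idx = [datacols.index(c) for c in columns]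
--     cols = [[row[i] for row in datas] for i in idx]
--     return [list(r) for r in zip(*cols)]
-- ===== Notes on version B (the rewrite author's own statement) =====
-- stated objective: alternative
-- what changed: B builds the projection column-major (one pass over all rows per selected column) and transposes back with zip(*cols), instead of A's row-major inner comprehension per row.
import Mathlib
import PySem

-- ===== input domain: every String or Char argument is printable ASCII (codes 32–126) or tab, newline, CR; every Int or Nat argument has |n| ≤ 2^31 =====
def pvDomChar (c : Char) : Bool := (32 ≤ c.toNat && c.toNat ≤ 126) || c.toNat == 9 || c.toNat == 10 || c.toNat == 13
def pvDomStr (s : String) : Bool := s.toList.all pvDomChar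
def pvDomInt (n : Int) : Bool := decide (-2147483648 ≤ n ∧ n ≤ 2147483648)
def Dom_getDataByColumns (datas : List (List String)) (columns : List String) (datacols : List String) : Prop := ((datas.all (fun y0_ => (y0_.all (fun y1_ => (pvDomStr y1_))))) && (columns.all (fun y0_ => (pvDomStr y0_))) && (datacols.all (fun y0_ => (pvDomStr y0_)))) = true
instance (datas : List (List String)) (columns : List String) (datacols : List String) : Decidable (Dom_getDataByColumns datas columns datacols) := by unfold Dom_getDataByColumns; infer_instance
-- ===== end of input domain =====

-- B builds the projection column-major and transposes back with zip(*cols); A builds it row-major. Same cost, different traversal.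

-- ===== PORT A =====
-- literal port of A: columnsNum via datacols.index (Pre_ guarantees success, getD 0 is never the raising case),
-- then a row-major comprehension; 'refinedDatas or datas' is the final if.
def getDataByColumns (datas : List (List String)) (columns : List String) (datacols : List String) : List (List String) :=
  let columnsNum : List Int :=
    if datas ≠ [] ∧ columns ≠ [] then columns.map (fun c => ((PySem.List.index? datacols c).getD 0 : Int)) else []
  let refinedDatas : List (List String) :=
    if columnsNum ≠ [] then
      datas.map (fun data => columnsNum.map (fun cn => (PySem.List.pyGet? data cn).getD ""))
    else []
  if refinedDatas ≠ [] then refinedDatas else datas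

-- ===== PORT B =====
-- zip(*cols): repeatedly take heads until some list is exhausted (Python's zip truncation rule)
def pyZipStar (cols : List (List String)) : List (List String) :=
  if h : cols = [] ∨ cols.any (fun l => l.isEmpty) then []
  else (cols.map (fun l => l.headD "")) :: pyZipStar (cols.map List.tail)
termination_by (cols.headD []).length
decreasing_by
  rcases cols with _ | ⟨c, rest⟩
  · simp at h
  · simp only [List.headD_cons]
    have hc : c ≠ [] := by
      intro hce; exact h (Or.inr (by simp [hce]))
    cases c with
    | nil => exact absurd rfl hc
    | cons x xs => simp

def getDataByColumns_alt (datas : List (List String)) (columns : List String) (datacols : List String) : List (List String) :=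
  if datas = [] ∨ columns = [] then datas
  else
    let idx : List Int := columns.map (fun c => ((PySem.List.index? datacols c).getD 0 : Int))
    let cols : List (List String) :=
      idx.map (fun i => datas.map (fun row => (PySem.List.pyGet? row i).getD ""))
    pyZipStar cols

-- ===== PRECONDITION & SPEC =====
-- Pre_ excludes exactly the inputs where Python A raises: a selected column missing from datacols
-- (ValueError from .index) or a row too short for a selected column's index (IndexError).
def Pre_getDataByColumns (datas : List (List String)) (columns : List String) (datacols : List String) : Prop :=
  (datas ≠ [] ∧ columns ≠ []) →
    ∀ c ∈ columns, c ∈ datacols ∧ ∀ row ∈ datas, ((PySem.List.index? datacols c).getD 0 : Nat) < row.length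
instance (datas : List (List String)) (columns : List String) (datacols : List String) : Decidable (Pre_getDataByColumns datas columns datacols) := by unfold Pre_getDataByColumns; infer_instance

def pvWitness_getDataByColumns : List (List String) × List String × List String :=
  ([["x", "y"], ["p", "q"]], ["b", "a"], ["a", "b"])

def Spec_getDataByColumns (datas : List (List String)) (columns : List String) (datacols : List String) (out : List (List String)) : Prop := out = getDataByColumns_alt datas columns datacols
instance (datas : List (List String)) (columns : List String) (datacols : List String) (out : List (List String)) : Decidable (Spec_getDataByColumns datas columns datacols out) := by unfold Spec_getDataByColumns; infer_instance

-- ===== CLAIM (what is proved, stated in full; the proofs are below) =====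
def Claim_equal_getDataByColumns : Prop := ∀ (datas : List (List String)) (columns : List String) (datacols : List String), Dom_getDataByColumns datas columns datacols → Pre_getDataByColumns datas columns datacols → Spec_getDataByColumns datas columns datacols (getDataByColumns datas columns datacols)

-- ===== LEMMAS AND PROOFS =====

-- transposing the column-major build recovers the row-major build
theorem pyZipStar_map_map (g : List String → Int → String) :
    ∀ (datas : List (List String)) (idx : List Int), idx ≠ [] →
      pyZipStar (idx.map (fun i => datas.map (fun row => g row i)))
        = datas.map (fun row => idx.map (g row)) := by
  intro datas
  induction datas with
  | nil =>
    intro idx hidx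
    rw [pyZipStar]
    cases idx with
    | nil => exact absurd rfl hidx
    | cons i is => simp
  | cons d rest ih =>
    intro idx hidx
    rw [pyZipStar]
    have hne : ¬ (idx.map (fun i => (d :: rest).map (fun row => g row i)) = []
        ∨ (idx.map (fun i => (d :: rest).map (fun row => g row i))).any (·.isEmpty)) := by
      simp [hidx]
    rw [dif_neg hne]
    simp only [List.map_map]
    have h1 : ((fun l => List.headD l "") ∘ fun i => (d :: rest).map (fun row => g row i))
        = fun i => g d i := by
      funext i; simp [Function.comp]
    have h2 : (List.tail ∘ fun i => (d :: rest).map (fun row => g row i))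
        = fun i => rest.map (fun row => g row i) := by
      funext i; simp [Function.comp]
    rw [h1, h2, ih idx hidx]
    simp

-- ===== VERDICT (by name: the statement is the Claim_ definition above) =====
theorem getDataByColumns_spec : Claim_equal_getDataByColumns := by
  intro datas columns datacols _dom _pre
  unfold Spec_getDataByColumns getDataByColumns getDataByColumns_alt
  by_cases h : datas = [] ∨ columns = []
  · have h' : ¬ (datas ≠ [] ∧ columns ≠ []) := by tauto
    simp only [if_neg h', if_pos h]
    simp
  · rw [not_or] at h
    simp only [if_pos h, if_neg (by tauto : ¬ (datas = [] ∨ columns = []))]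
    have hidx : columns.map (fun c => ((PySem.List.index? datacols c).getD 0 : Int)) ≠ [] := by
      simp [h.2]
    rw [if_pos hidx]
    have hds : datas ≠ [] := h.1
    split_ifs with hr
    · rw [pyZipStar_map_map (fun row i => (PySem.List.pyGet? row i).getD "") datas _ hidx]
    · simp [hds] at hr
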